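-- pv_equiv track=rewrite | github.com/37YongJun-LEE/ReadyForTest-And-Algorithm | PGS/구명보트.py | solution
-- ===== SOURCE A (Python) =====
-- def solution(people, limit):
--     answer = 0
--     people.sort(reverse=True)
--     while people:
--         v = people.pop(0)
--         k = limit - v
--         for i in range(len(people)):
--             if people[i] <= k:
--                 people.pop(i)
--                 break
--         answer += 1
--         if len(people) == 1:
--             answer += 1
--             break
--
--     return answer
-- ===== SOURCE B (Python) =====
-- def solution(people, limit):
--     people = sorted(people)
--     boats = 0
--     lo, hi = 0, len(people) - 1
--     while lo <= hi:
--         if people[lo] + people[hi] <= limit: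
--             lo += 1
--         hi -= 1
--         boats += 1
--     return boats
-- ===== Notes on version B (the rewrite author's own statement) =====
-- stated objective: faster
-- what changed: Replaces A's repeated pop(0)/linear partner scan on a reverse-sorted list (quadratic) with the classic two-pointer greedy over one ascending sort, pairing the heaviest with the lightest instead of with the largest fitting partner.
import Mathlib
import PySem

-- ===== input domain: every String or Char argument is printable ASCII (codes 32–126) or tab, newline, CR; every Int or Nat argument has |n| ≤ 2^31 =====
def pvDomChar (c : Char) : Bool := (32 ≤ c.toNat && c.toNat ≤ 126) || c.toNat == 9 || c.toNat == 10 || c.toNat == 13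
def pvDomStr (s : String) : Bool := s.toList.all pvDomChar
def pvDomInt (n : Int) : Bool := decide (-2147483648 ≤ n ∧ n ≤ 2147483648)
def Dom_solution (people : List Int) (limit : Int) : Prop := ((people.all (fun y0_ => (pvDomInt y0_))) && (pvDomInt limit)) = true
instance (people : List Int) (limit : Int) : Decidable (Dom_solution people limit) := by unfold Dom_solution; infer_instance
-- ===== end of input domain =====

-- B replaces A's quadratic pop(0)/linear-partner-scan greedy with the two-pointer greedy on one
-- ascending sort; the equivalence is about the RETURN value only (A sorts and drains its
-- `people` argument in place, B leaves it untouched).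

-- ===== PORT A =====
-- 'for i in range(len(people)): if people[i] <= k: people.pop(i); break' — scan, remove first fit
def popFirstFit (xs : List Int) (k : Int) : List Int :=
  match xs with
  | [] => []
  | x :: rest => if x ≤ k then rest else x :: popFirstFit rest k

theorem popFirstFit_length_le (xs : List Int) (k : Int) :
    (popFirstFit xs k).length ≤ xs.length := by
  induction xs with
  | nil => simp [popFirstFit]
  | cons x rest ih => simp only [popFirstFit]; split <;> simp <;> omega

-- the 'while people:' loop of A, carrying 'answer'
def solutionLoop (people : List Int) (limit : Int) (answer : Int) : Int :=
  match people with
  | [] => answer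
  | v :: rest =>
    let k := limit - v
    let rest' := popFirstFit rest k
    if rest'.length = 1 then (answer + 1) + 1
    else solutionLoop rest' limit (answer + 1)
termination_by people.length
decreasing_by
  have := popFirstFit_length_le rest (limit - v); simp; omega

def solution (people : List Int) (limit : Int) : Int :=
  solutionLoop (PySem.List.sorted people (fun x => x) true) limit 0

-- ===== PORT B =====
-- 'while lo <= hi: …' two-pointer loop of B
def twoPtr (arr : List Int) (limit : Int) (lo hi boats : Int) : Int :=
  if lo ≤ hi then
    twoPtr arr limit
      (if PySem.List.pyGetD arr lo 0 + PySem.List.pyGetD arr hi 0 ≤ limit then lo + 1 else lo)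
      (hi - 1) (boats + 1)
  else boats
termination_by (hi + 1 - lo).toNat
decreasing_by split <;> omega

def solution_alt (people : List Int) (limit : Int) : Int :=
  let ppl := PySem.List.sorted people (fun x => x) false
  twoPtr ppl limit 0 (PySem.List.len ppl - 1) 0

-- ===== PRECONDITION & SPEC =====
def Spec_solution (people : List Int) (limit : Int) (out : Int) : Prop := out = solution_alt people limit
instance (people : List Int) (limit : Int) (out : Int) : Decidable (Spec_solution people limit out) := by unfold Spec_solution; infer_instance

-- ===== CLAIM (what is proved, stated in full; the proofs are below) =====
def Claim_equal_solution : Prop := ∀ (people : List Int) (limit : Int), Dom_solution people limit → Spec_solution people limit (solution people limit)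

-- ===== LEMMAS AND PROOFS =====

-- A's loop with the 'len == 1' shortcut removed: pure boat count of A's pairing rule
def cLoop (limit : Int) (people : List Int) : Int :=
  match people with
  | [] => 0
  | v :: rest => 1 + cLoop limit (popFirstFit rest (limit - v))
termination_by people.length
decreasing_by
  have := popFirstFit_length_le rest (limit - v); simp; omega

-- structural form of the two-pointer loop on the DESCENDING list: pair head with last if it fits
def gLoop (limit : Int) (people : List Int) : Int :=
  match people with
  | [] => 0
  | v :: rest =>
    match rest.getLast? with
    | none => 1
    | some b =>
      if v + b ≤ limit then 1 + gLoop limit rest.dropLast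
      else 1 + gLoop limit rest
termination_by people.length
decreasing_by
  all_goals simp

theorem solutionLoop_eq_cLoop : ∀ (n : Nat) (people : List Int) (limit a : Int),
    people.length ≤ n → solutionLoop people limit a = a + cLoop limit people := by
  intro n
  induction n with
  | zero =>
    intro people limit a h
    have : people = [] := List.eq_nil_of_length_eq_zero (by omega)
    subst this; simp [solutionLoop, cLoop]
  | succ n ih =>
    intro people limit a h
    match people with
    | [] => simp [solutionLoop, cLoop]
    | v :: rest =>
      rw [solutionLoop, cLoop]
      by_cases h1 : (popFirstFit rest (limit - v)).length = 1
      · obtain ⟨z, hz⟩ := List.length_eq_one_iff.mp h1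
        rw [if_pos h1, hz, cLoop]
        simp [popFirstFit, cLoop]
        ring
      · rw [if_neg h1]
        have hlen : (popFirstFit rest (limit - v)).length ≤ n := by
          have := popFirstFit_length_le rest (limit - v)
          simp at h; omega
        rw [ih _ limit (a + 1) hlen]
        ring

theorem head_max {u : Int} {tail : List Int} (h : (u :: tail).Pairwise (· ≥ ·)) :
    ∀ z ∈ u :: tail, z ≤ u := by
  intro z hz
  rcases List.mem_cons.mp hz with rfl | hz
  · exact le_refl z
  · exact (List.pairwise_cons.mp h).1 z hz

theorem getLast_min : ∀ {l : List Int} {b : Int}, l.Pairwise (· ≥ ·) → l.getLast? = some b →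
    ∀ z ∈ l, b ≤ z := by
  intro l
  induction l with
  | nil => intro b _ h; simp at h
  | cons a rest ih =>
    intro b hp hl z hz
    match rest with
    | [] =>
      simp at hl hz; omega
    | c :: t =>
      rw [List.getLast?_cons_cons] at hl
      have hb := ih (List.pairwise_cons.mp hp).2 hl
      rcases List.mem_cons.mp hz with rfl | hz
      · exact le_trans (hb c (by simp)) ((List.pairwise_cons.mp hp).1 c (by simp))
      · exact hb z hz

theorem popFirstFit_of_forall_gt {xs : List Int} {k : Int} (h : ∀ x ∈ xs, k < x) :
    popFirstFit xs k = xs := by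
  induction xs with
  | nil => rfl
  | cons x rest ih =>
    rw [popFirstFit, if_neg (by have := h x (by simp); omega)]
    rw [ih (fun z hz => h z (by simp [hz]))]

theorem popFirstFit_eq_erase : ∀ {xs : List Int} {k p : Int},
    xs.find? (fun x => decide (x ≤ k)) = some p → popFirstFit xs k = xs.erase p := by
  intro xs
  induction xs with
  | nil => intro k p h; simp at h
  | cons x rest ih =>
    intro k p h
    rw [List.find?_cons] at h
    by_cases hx : x ≤ k
    · simp [hx] at h
      rw [popFirstFit, if_pos hx, List.erase_cons, if_pos (by simp [h])]
    · simp [hx] at h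
      have hp : p ≤ k := by have := List.find?_some h; simpa using this
      rw [popFirstFit, if_neg hx, List.erase_cons, if_neg (by simp; omega), ih h]

theorem find?_le {xs : List Int} {k p : Int} (h : xs.find? (fun x => decide (x ≤ k)) = some p) :
    p ≤ k := by have := List.find?_some h; simpa using this

theorem find?_max : ∀ {xs : List Int} {k p : Int}, xs.Pairwise (· ≥ ·) →
    xs.find? (fun x => decide (x ≤ k)) = some p → ∀ z ∈ xs, z ≤ k → z ≤ p := by
  intro xs
  induction xs with
  | nil => intro k p _ h; simp at h
  | cons x rest ih =>
    intro k p hs h z hz hzk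
    rw [List.find?_cons] at h
    by_cases hx : x ≤ k
    · simp [hx] at h
      subst h
      exact head_max hs z hz
    · simp [hx] at h
      rcases List.mem_cons.mp hz with rfl | hz
      · omega
      · exact ih (List.pairwise_cons.mp hs).2 h z hz hzk

theorem find?_exists {xs : List Int} {k y : Int} (hy : y ∈ xs) (hyk : y ≤ k) :
    ∃ p, xs.find? (fun x => decide (x ≤ k)) = some p := by
  cases h : xs.find? (fun x => decide (x ≤ k)) with
  | some p => exact ⟨p, rfl⟩
  | none =>
    have := List.find?_eq_none.mp h y hy
    simp at this; omega

theorem erase_getLast_eq_dropLast : ∀ {l : List Int} {b : Int}, l.Pairwise (· ≥ ·) →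
    l.getLast? = some b → l.erase b = l.dropLast := by
  intro l
  induction l with
  | nil => intro b _ h; simp at h
  | cons a rest ih =>
    intro b hp hl
    match rest with
    | [] =>
      simp at hl; subst hl; simp
    | c :: t =>
      rw [List.getLast?_cons_cons] at hl
      by_cases hab : a = b
      · -- the head equals the minimum: every element of the list is equal
        subst hab
        have hmin := getLast_min (List.pairwise_cons.mp hp).2 hl
        have hmax := (List.pairwise_cons.mp hp).1
        have hall : ∀ z ∈ c :: t, z = a := fun z hz => le_antisymm (hmax z hz) (hmin z hz)
        rw [List.erase_cons, if_pos (by simp)]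
        rw [List.dropLast_cons₂]
        have h1 : c :: t = List.replicate (c :: t).length a :=
          List.eq_replicate_iff.mpr ⟨rfl, hall⟩
        have h2 : a :: (c :: t).dropLast = List.replicate (c :: t).length a := by
          apply List.eq_replicate_iff.mpr
          constructor
          · simp
          · intro z hz
            rcases List.mem_cons.mp hz with rfl | hz
            · rfl
            · exact hall z (List.dropLast_sublist _ |>.mem hz)
        rw [h2]; exact h1
      · rw [List.erase_cons, if_neg (by simp [hab]), List.dropLast_cons₂,
          ih (List.pairwise_cons.mp hp).2 hl]

theorem allFit : ∀ (n : Nat) (N : List Int) (limit : Int), N.length ≤ n →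
    N.Pairwise (· ≥ ·) → (∀ a ∈ N, ∀ b ∈ N, a + b ≤ limit) →
    cLoop limit N = (((N.length + 1) / 2 : Nat) : Int) := by
  intro n
  induction n with
  | zero =>
    intro N limit h _ _
    have : N = [] := List.eq_nil_of_length_eq_zero (by omega)
    subst this; simp [cLoop]
  | succ n ih =>
    intro N limit h hs hfit
    match N with
    | [] => simp [cLoop]
    | [v] => simp [cLoop, popFirstFit]
    | v :: w :: t =>
      rw [cLoop, popFirstFit, if_pos (by have := hfit w (by simp) v (by simp); omega)]
      have ht : t.length ≤ n := by simp at h; omega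
      have hst : t.Pairwise (· ≥ ·) :=
        ((List.pairwise_cons.mp (List.pairwise_cons.mp hs).2).2)
      rw [ih t limit ht hst (fun a ha b hb => hfit a (List.mem_cons_of_mem _ (List.mem_cons_of_mem _ ha)) b (List.mem_cons_of_mem _ (List.mem_cons_of_mem _ hb)))]
      have harith : (v :: w :: t).length + 1 = (t.length + 1) + 2 := by simp
      rw [harith]
      have : ((t.length + 1) + 2) / 2 = (t.length + 1) / 2 + 1 := by omega
      rw [this]
      push_cast
      ring

-- THE exchange argument: if x pairs with everything in M, removing x or removing any
-- lighter y from the sorted list M leaves the same boat count under A's pairing rule.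
theorem exchange : ∀ (n : Nat) (M : List Int) (limit x y : Int), M.length ≤ n →
    M.Pairwise (· ≥ ·) → x ∈ M → y ∈ M → y ≤ x → (∀ z ∈ M, x + z ≤ limit) →
    cLoop limit (M.erase x) = cLoop limit (M.erase y) := by
  intro n
  induction n with
  | zero =>
    intro M limit x y h _ hx _ _ _
    have : M = [] := List.eq_nil_of_length_eq_zero (by omega)
    subst this; simp at hx
  | succ n ih =>
    intro M limit x y h hs hx hy hyx hlim
    by_cases hxy : x = y
    · subst hxy; rfl
    match M with
    | [] => simp at hx
    | u :: tail =>
      have htlen : tail.length ≤ n := by simp at h; omega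
      have hst : tail.Pairwise (· ≥ ·) := (List.pairwise_cons.mp hs).2
      by_cases hxu : x = u
      · -- x is (equal in value to) the maximum: every pair fits; count depends on length only
        have hallp : ∀ a ∈ u :: tail, ∀ b ∈ u :: tail, a + b ≤ limit := by
          intro a ha b hb
          have h1 : a ≤ u := head_max hs a ha
          have h2 := hlim b hb
          omega
        have e1 : List.Sublist ((u :: tail).erase x) (u :: tail) := List.erase_sublist
        have e2 : List.Sublist ((u :: tail).erase y) (u :: tail) := List.erase_sublist
        have l1 : ((u :: tail).erase x).length = tail.length := by
          rw [List.length_erase_of_mem hx]; simp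
        have l2 : ((u :: tail).erase y).length = tail.length := by
          rw [List.length_erase_of_mem hy]; simp
        rw [allFit n _ limit (by omega) (hs.sublist e1)
              (fun a ha b hb => hallp a (e1.mem ha) b (e1.mem hb)),
            allFit n _ limit (by omega) (hs.sublist e2)
              (fun a ha b hb => hallp a (e2.mem ha) b (e2.mem hb)), l1, l2]
      · -- x, y both live in the tail
        have hxt : x ∈ tail := by
          rcases List.mem_cons.mp hx with h' | h'
          · exact absurd h' hxu
          · exact h'
        have hxleu : x ≤ u := head_max hs x hx
        have hyu : y ≠ u := by
          intro h'; subst h'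
          exact hxy (le_antisymm hxleu hyx)
        have hyt : y ∈ tail := by
          rcases List.mem_cons.mp hy with h' | h'
          · exact absurd h' hyu
          · exact h'
        have hyltx : y < x := lt_of_le_of_ne hyx (Ne.symm hxy)
        have hxk : x ≤ limit - u := by have := hlim u (by simp); omega
        have hxex : x ∈ tail.erase y := (List.mem_erase_of_ne hxy).mpr hxt
        have hyex : y ∈ tail.erase x := (List.mem_erase_of_ne (Ne.symm hxy)).mpr hyt
        have hsx : (tail.erase x).Pairwise (· ≥ ·) := hst.sublist List.erase_sublist
        have hsy : (tail.erase y).Pairwise (· ≥ ·) := hst.sublist List.erase_sublist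
        rw [List.erase_cons, if_neg (by simp [Ne.symm hxu]),
            List.erase_cons, if_neg (by simp [Ne.symm hyu]),
            cLoop, cLoop]
        obtain ⟨p, hp⟩ := find?_exists hyex (by omega : y ≤ limit - u)
        obtain ⟨q, hq⟩ := find?_exists hxex hxk
        obtain ⟨p0, hp0⟩ := find?_exists hxt hxk
        rw [popFirstFit_eq_erase hp, popFirstFit_eq_erase hq]
        have hpt : p ∈ tail := List.mem_of_mem_erase (List.mem_of_find?_eq_some hp)
        have hqt : q ∈ tail := List.mem_of_mem_erase (List.mem_of_find?_eq_some hq)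
        have hxp0 : x ≤ p0 := find?_max hst hp0 x hxt hxk
        have helen : (tail.erase x).length ≤ n :=
          le_trans (List.erase_sublist (a := x) (l := tail)).length_le htlen
        by_cases hcase : x = p0
        · -- x itself is the best partner in tail: B's side removes x, A's side removes p
          have hqx : q = x :=
            le_antisymm (hcase ▸ find?_max hst hp0 q hqt (find?_le hq))
              (find?_max hsy hq x hxex hxk)
          have hpx : p ≤ x := hcase ▸ find?_max hst hp0 p hpt (find?_le hp)
          rw [hqx, List.erase_comm y x (l := tail)]
          congr 1
          exact ih (tail.erase x) limit p y helen hsx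
            (List.mem_of_find?_eq_some hp) hyex
            (find?_max hsx hp y hyex (by omega))
            (fun z hz => by
              have := hlim z (List.mem_cons_of_mem _ (List.mem_of_mem_erase hz)); omega)
        · -- the best partner p0 is heavier than x and y: both sides remove p0
          have hxltp0 : x < p0 := lt_of_le_of_ne hxp0 hcase
          have hp0k : p0 ≤ limit - u := find?_le hp0
          have hp0t : p0 ∈ tail := List.mem_of_find?_eq_some hp0
          have hp0ex : p0 ∈ tail.erase x := (List.mem_erase_of_ne (by omega)).mpr hp0t
          have hp0ey : p0 ∈ tail.erase y := (List.mem_erase_of_ne (by omega)).mpr hp0t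
          have hpp0 : p = p0 :=
            le_antisymm (find?_max hst hp0 p hpt (find?_le hp))
              (find?_max hsx hp p0 hp0ex hp0k)
          have hqp0 : q = p0 :=
            le_antisymm (find?_max hst hp0 q hqt (find?_le hq))
              (find?_max hsy hq p0 hp0ey hp0k)
          rw [hpp0, hqp0, List.erase_comm x p0 (l := tail), List.erase_comm y p0 (l := tail)]
          congr 1
          exact ih (tail.erase p0) limit x y
            (le_trans (List.erase_sublist (a := p0) (l := tail)).length_le htlen)
            (hst.sublist List.erase_sublist)
            ((List.mem_erase_of_ne (by omega)).mpr hxt)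
            ((List.mem_erase_of_ne (by omega)).mpr hyt) hyx
            (fun z hz => hlim z (List.mem_cons_of_mem _ (List.mem_of_mem_erase hz)))

theorem c_eq_g : ∀ (n : Nat) (L : List Int) (limit : Int),
    L.length ≤ n → L.Pairwise (· ≥ ·) → cLoop limit L = gLoop limit L := by
  intro n
  induction n with
  | zero =>
    intro L limit h _
    have : L = [] := List.eq_nil_of_length_eq_zero (by omega)
    subst this; simp [cLoop, gLoop]
  | succ n ih =>
    intro L limit h hs
    match L with
    | [] => simp [cLoop, gLoop]
    | v :: rest =>
      rw [cLoop, gLoop]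
      have hst : rest.Pairwise (· ≥ ·) := (List.pairwise_cons.mp hs).2
      cases hb : rest.getLast? with
      | none =>
        have : rest = [] := List.getLast?_eq_none_iff.mp hb
        subst this; simp [popFirstFit, cLoop]
      | some b =>
        have hbm : b ∈ rest := List.mem_of_getLast? hb
        show 1 + cLoop limit (popFirstFit rest (limit - v))
          = if v + b ≤ limit then 1 + gLoop limit rest.dropLast else 1 + gLoop limit rest
        by_cases hfit : v + b ≤ limit
        · rw [if_pos hfit]
          obtain ⟨p, hp⟩ := find?_exists hbm (by omega : b ≤ limit - v)
          rw [popFirstFit_eq_erase hp]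
          have hex : cLoop limit (rest.erase p) = cLoop limit (rest.erase b) :=
            exchange n rest limit p b (by simp at h; omega) hst
              (List.mem_of_find?_eq_some hp) hbm
              (find?_max hst hp b hbm (by omega))
              (fun z hz => by
                have h1 : p ≤ limit - v := find?_le hp
                have h2 : z ≤ v := (List.pairwise_cons.mp hs).1 z hz
                omega)
          rw [hex, erase_getLast_eq_dropLast hst hb]
          congr 1
          exact ih rest.dropLast limit (by simp at h ⊢; omega)
            (hst.sublist (List.dropLast_sublist rest))
        · rw [if_neg hfit]
          have hmin := getLast_min hst hb
          rw [popFirstFit_of_forall_gt (fun z hz => by have := hmin z hz; omega)]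
          congr 1
          exact ih rest limit (by simp at h; omega) hst

theorem seg_empty {arr : List Int} {lo hi : Int} (h : hi < lo) (h0 : 0 ≤ lo) :
    (arr.take (hi + 1).toNat).drop lo.toNat = [] := by
  apply List.drop_eq_nil_of_le
  have := List.length_take (i := (hi + 1).toNat) (l := arr)
  omega

theorem twoPtr_eq_g : ∀ (n : Nat) (arr : List Int) (limit lo hi boats : Int),
    (hi + 1 - lo).toNat ≤ n → 0 ≤ lo → hi < arr.length →
    twoPtr arr limit lo hi boats
      = boats + gLoop limit (((arr.take (hi + 1).toNat).drop lo.toNat).reverse) := by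
  intro n
  induction n with
  | zero =>
    intro arr limit lo hi boats hn hlo hhi
    rw [twoPtr, if_neg (by omega), seg_empty (by omega) hlo]
    simp [gLoop]
  | succ n ih =>
    intro arr limit lo hi boats hn hlo hhi
    by_cases hcmp : lo ≤ hi
    · rw [twoPtr, if_pos hcmp]
      have hlolen : lo < (arr.length : Int) := by omega
      have hg1 : PySem.List.pyGetD arr lo 0 = arr[lo.toNat] :=
        PySem.List.pyGetD_eq_getElem arr 0 hlo (by exact_mod_cast hlolen)
      have hg2 : PySem.List.pyGetD arr hi 0 = arr[hi.toNat] :=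
        PySem.List.pyGetD_eq_getElem arr 0 (by omega) (by exact_mod_cast hhi)
      have hH1 : (hi + 1).toNat = hi.toNat + 1 := by omega
      have hHlt : hi.toNat < arr.length := by omega
      have htake : arr.take (hi + 1).toNat = arr.take hi.toNat ++ [arr[hi.toNat]] := by
        rw [hH1, List.take_add_one, List.getElem?_eq_getElem hHlt]; rfl
      have hLle : lo.toNat ≤ (arr.take hi.toNat).length := by
        rw [List.length_take]; omega
      have hseg : (arr.take (hi + 1).toNat).drop lo.toNat
          = (arr.take hi.toNat).drop lo.toNat ++ [arr[hi.toNat]] := by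
        rw [htake, List.drop_append_of_le_length hLle]
      rw [hseg, List.reverse_concat]
      rw [hg1, hg2]
      by_cases hLH : lo.toNat = hi.toNat
      · -- single element left: one boat either way
        have hhead : ((arr.take hi.toNat).drop lo.toNat) = [] := by
          apply List.drop_eq_nil_of_le; rw [List.length_take]; omega
        rw [hhead]
        by_cases hc : arr[lo.toNat] + arr[hi.toNat] ≤ limit
        · rw [if_pos hc, ih arr limit (lo + 1) (hi - 1) (boats + 1) (by omega) (by omega) (by omega),
            seg_empty (by omega) (by omega)]
          simp [gLoop]
        · rw [if_neg hc, ih arr limit lo (hi - 1) (boats + 1) (by omega) (by omega) (by omega),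
            seg_empty (by omega) (by omega)]
          simp [gLoop]
      · -- at least two elements left
        have hLltH : lo.toNat < hi.toNat := by omega
        have hhead : ((arr.take hi.toNat).drop lo.toNat).head? = some arr[lo.toNat] := by
          rw [List.head?_eq_getElem?, List.getElem?_drop,
            List.getElem?_take_of_lt (by omega), Nat.add_zero,
            List.getElem?_eq_getElem (by omega)]
        have hlast : ((arr.take hi.toNat).drop lo.toNat).reverse.getLast? = some arr[lo.toNat] := by
          rw [List.getLast?_reverse, hhead]
        show _ = boats + gLoop limit (arr[hi.toNat] :: ((arr.take hi.toNat).drop lo.toNat).reverse)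
        rw [gLoop, hlast]
        show _ = boats + (if arr[hi.toNat] + arr[lo.toNat] ≤ limit
          then 1 + gLoop limit ((arr.take hi.toNat).drop lo.toNat).reverse.dropLast
          else 1 + gLoop limit ((arr.take hi.toNat).drop lo.toNat).reverse)
        by_cases hc : arr[lo.toNat] + arr[hi.toNat] ≤ limit
        · rw [if_pos hc, if_pos (by omega),
            ih arr limit (lo + 1) (hi - 1) (boats + 1) (by omega) (by omega) (by omega)]
          have h1 : (hi - 1 + 1).toNat = hi.toNat := by omega
          have h2 : (lo + 1).toNat = lo.toNat + 1 := by omega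
          rw [h1, h2, List.dropLast_reverse, List.tail_drop]
          ring
        · rw [if_neg hc, if_neg (by omega),
            ih arr limit lo (hi - 1) (boats + 1) (by omega) (by omega) (by omega)]
          have h1 : (hi - 1 + 1).toNat = hi.toNat := by omega
          rw [h1]
          ring
    · rw [twoPtr, if_neg hcmp, seg_empty (by omega) hlo]
      simp [gLoop]

-- sorted(xs, reverse=True) is the reverse of sorted(xs) on Int values
theorem sortedDesc_eq_reverse (xs : List Int) :
    PySem.List.sorted xs (fun x => x) true = (PySem.List.sorted xs (fun x => x) false).reverse := by
  have ha : (PySem.List.sorted xs (fun x => x) false).Pairwise (fun a b : Int => a ≤ b) :=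
    PySem.List.sorted_pairwise xs (fun x : Int => x)
  have hd : (PySem.List.sorted xs (fun x => x) true).Pairwise (fun a b : Int => b ≤ a) :=
    PySem.List.sorted_pairwise_rev xs (fun x : Int => x)
  have hr : (PySem.List.sorted xs (fun x => x) false).reverse.Pairwise (fun a b : Int => b ≤ a) := by
    rw [List.pairwise_reverse]; exact ha
  have hp : (PySem.List.sorted xs (fun x => x) true).Perm ((PySem.List.sorted xs (fun x => x) false).reverse) :=
    (PySem.List.sorted_perm ..).trans
      (((List.reverse_perm _).trans (PySem.List.sorted_perm xs (fun x => x) false)).symm)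
  exact List.Perm.eq_of_pairwise (fun a b _ _ h1 h2 => le_antisymm h2 h1) hd hr hp

-- ===== VERDICT (by name: the statement is the Claim_ definition above) =====
theorem solution_spec : Claim_equal_solution := by
  intro people limit _
  unfold Spec_solution solution
  have hdesc : (PySem.List.sorted people (fun x => x) true).Pairwise (· ≥ ·) :=
    (PySem.List.sorted_pairwise_rev people (fun x : Int => x)).imp (fun h => h)
  rw [solutionLoop_eq_cLoop (PySem.List.sorted people (fun x => x) true).length _ limit 0 le_rfl,
    c_eq_g (PySem.List.sorted people (fun x => x) true).length _ limit le_rfl hdesc]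
  show (0 : Int) + gLoop limit (PySem.List.sorted people (fun x => x) true)
    = solution_alt people limit
  unfold solution_alt
  show _ = twoPtr (PySem.List.sorted people (fun x => x) false) limit 0
    (PySem.List.len (PySem.List.sorted people (fun x => x) false) - 1) 0
  rw [PySem.List.len_eq]
  set S := PySem.List.sorted people (fun x => x) false with hS
  rw [twoPtr_eq_g S.length S limit 0 ((S.length : Int) - 1) 0 (by omega) (by omega) (by omega)]
  have h1 : ((S.length : Int) - 1 + 1).toNat = S.length := by omega
  rw [h1, List.take_length, show (Int.toNat 0) = 0 from rfl, List.drop_zero, sortedDesc_eq_reverse]
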